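-- pv_equiv track=rewrite | github.com/iskhakov-s/algorithms_class | time_analysis/classwork_for_solving_recurrence_relations/scratch.py | mystery_sum
-- ===== SOURCE A (Python) =====
-- def mystery_sum(num):
--     if num == 0:
--         return 0
--     total = 0
--     for idx1 in range(num):
--         for idx2 in range(num):
--             total += idx1 * idx2
--     return total + mystery_sum(num - 1)
-- ===== SOURCE B (Python) =====
-- def mystery_sum(num):
--     # closed form: sum_{k=1..num} (k*(k-1)/2)^2 = num*(num-1)*(num+1)*(3*num*num-2)/60
--     return num * (num - 1) * (num + 1) * (3 * num * num - 2) // 60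
-- ===== Notes on version B (the rewrite author's own statement) =====
-- stated objective: faster
-- what changed: replaced the recursive triple-nested summation with the exact closed-form polynomial num*(num-1)*(num+1)*(3*num^2-2)//60
import Mathlib
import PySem

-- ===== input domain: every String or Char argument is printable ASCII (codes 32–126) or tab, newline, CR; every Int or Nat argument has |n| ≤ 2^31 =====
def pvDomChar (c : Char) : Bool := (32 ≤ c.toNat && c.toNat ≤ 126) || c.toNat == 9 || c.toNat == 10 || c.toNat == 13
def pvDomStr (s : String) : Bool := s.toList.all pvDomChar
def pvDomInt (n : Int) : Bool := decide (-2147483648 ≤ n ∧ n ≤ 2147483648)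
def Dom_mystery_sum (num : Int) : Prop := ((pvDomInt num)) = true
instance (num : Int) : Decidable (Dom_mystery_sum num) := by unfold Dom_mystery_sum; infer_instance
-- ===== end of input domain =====

-- B replaces A's recursive triple-nested summation by the exact closed-form polynomial
-- num*(num-1)*(num+1)*(3*num^2-2)//60: objective faster (O(1) vs O(num^3)).


-- ===== PORT A =====
-- inner loop: for idx2 in range(num): total += idx1 * idx2
def msInner (num idx1 total : Int) : Int :=
  (PySem.List.pyRange 0 num 1).foldl (fun t idx2 => t + idx1 * idx2) total
-- both loops: total = 0; for idx1 in range(num): <inner>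
def msTotal (num : Int) : Int :=
  (PySem.List.pyRange 0 num 1).foldl (fun total idx1 => msInner num idx1 total) 0
-- the recursion of A on num, run on num.toNat so it terminates in Lean;
-- faithful to A for num ≥ 0 (Pre_): A diverges (RecursionError) for num < 0.
def msGo : Nat → Int
  | 0 => 0
  | n + 1 => msTotal ((n : Int) + 1) + msGo n
def mystery_sum (num : Int) : Int := msGo num.toNat

-- ===== PORT B =====
def mystery_sum_alt (num : Int) : Int :=
  PySem.Int.floordiv (num * (num - 1) * (num + 1) * (3 * num * num - 2)) 60

-- ===== PRECONDITION & SPEC =====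
-- Pre_ excludes num < 0, where the Python A recurses forever (RecursionError).
def Pre_mystery_sum (num : Int) : Prop := 0 ≤ num
instance (num : Int) : Decidable (Pre_mystery_sum num) := by unfold Pre_mystery_sum; infer_instance
def pvWitness_mystery_sum : Int := 4

def Spec_mystery_sum (num : Int) (out : Int) : Prop := out = mystery_sum_alt num
instance (num : Int) (out : Int) : Decidable (Spec_mystery_sum num out) := by unfold Spec_mystery_sum; infer_instance

-- ===== CLAIM (what is proved, stated in full; the proofs are below) =====
def Claim_equal_mystery_sum : Prop := ∀ (num : Int), Dom_mystery_sum num → Pre_mystery_sum num → Spec_mystery_sum num (mystery_sum num)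

-- ===== LEMMAS AND PROOFS =====

-- S k = 0 + 1 + … + (k-1) as an Int
def msS (k : Nat) : Int := ((List.range k).map (Nat.cast : Nat → Int)).sum

theorem msS_succ (k : Nat) : msS (k + 1) = msS k + (k : Int) := by
  simp [msS, List.range_succ]

theorem two_msS (k : Nat) : 2 * msS k = (k : Int) * ((k : Int) - 1) := by
  induction k with
  | zero => simp [msS]
  | succ n ih => rw [msS_succ]; push_cast; ring_nf; ring_nf at ih; linarith

theorem msInner_eq (k : Nat) (c t : Int) : msInner (k : Int) c t = t + c * msS k := by
  rw [msInner, PySem.List.foldl_add (g := fun x => c * x)]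
  congr 1
  rw [PySem.List.pyRange_one]
  simp only [sub_zero, Int.toNat_natCast, List.map_map, Function.comp_def, zero_add]
  rw [List.sum_map_mul_left, msS]

theorem msTotal_eq (k : Nat) : msTotal (k : Int) = msS k * msS k := by
  rw [msTotal]
  have h : ∀ total idx1 : Int, msInner (k : Int) idx1 total = total + idx1 * msS k := fun t c => msInner_eq k c t
  simp only [h]
  rw [PySem.List.foldl_add (g := fun x => x * msS k)]
  rw [PySem.List.pyRange_one]
  simp only [sub_zero, Int.toNat_natCast, List.map_map, Function.comp_def, zero_add]
  rw [List.sum_map_mul_right, msS]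

theorem msGo_closed (k : Nat) :
    60 * msGo k = (k : Int) * ((k : Int) - 1) * ((k : Int) + 1) * (3 * (k : Int) * (k : Int) - 2) := by
  induction k with
  | zero => simp [msGo]
  | succ n ih =>
    have hT : msTotal ((n : Int) + 1) = msS (n + 1) * msS (n + 1) := by
      have := msTotal_eq (n + 1); push_cast at this ⊢; exact this
    have h2 : 2 * msS (n + 1) = ((n : Int) + 1) * (n : Int) := by
      have := two_msS (n + 1); push_cast at this; linarith
    have h4 : 4 * (msS (n + 1) * msS (n + 1)) = (((n : Int) + 1) * (n : Int)) * (((n : Int) + 1) * (n : Int)) := by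
      calc 4 * (msS (n + 1) * msS (n + 1)) = (2 * msS (n + 1)) * (2 * msS (n + 1)) := by ring
        _ = _ := by rw [h2]
    show 60 * (msTotal ((n : Int) + 1) + msGo n) = _
    rw [hT]
    push_cast
    nlinarith [h4, ih]

-- ===== VERDICT (by name: the statement is the Claim_ definition above) =====
theorem mystery_sum_spec : Claim_equal_mystery_sum := by
  intro num _ hpre
  show mystery_sum num = mystery_sum_alt num
  obtain ⟨k, rfl⟩ : ∃ k : Nat, num = (k : Int) := ⟨num.toNat, (Int.toNat_of_nonneg hpre).symm⟩
  rw [mystery_sum_alt, PySem.Int.floordiv_eq_ediv_of_pos (by norm_num)]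
  have h := msGo_closed k
  rw [mystery_sum, Int.toNat_natCast, ← h, Int.mul_ediv_cancel_left _ (by norm_num)]
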